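-- pv_equiv track=rewrite | github.com/nicolasenciso/PCAhttp | featureExtractionM.py | charactersExtraction
-- ===== SOURCE A (Python) =====
-- def charactersExtraction(url):
--     arrobaCount, minusCount, pointCount, admirationCount, sharpCount, apostropheCount = 0,0,0,0,0,0
--     pesosCount, percentCount, ampersandCount, commaCount, pointcommaCount = 0,0,0,0,0
--     for character in url:#extraction of characters from the url
--         if character == "@":
--             arrobaCount += 1
--         elif character == "-":
--             minusCount += 1
--         elif character == ".":
--             pointCount += 1
--         elif character == "!":
--             admirationCount += 1
--         elif character == "#":
--             sharpCount += 1
--         elif character == "'":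
--             apostropheCount += 1
--         elif character == "$":
--             pesosCount += 1
--         elif character == "&":
--             ampersandCount += 1
--         elif character == ",":
--             commaCount += 1
--         elif character == ";":
--             pointcommaCount += 1
--
--     meanCharactersMeasure = arrobaCount+minusCount+pointCount+admirationCount+sharpCount+apostropheCount+pesosCount+percentCount+ampersandCount+commaCount+pointcommaCount
--     return str(meanCharactersMeasure)
-- ===== SOURCE B (Python) =====
-- def charactersExtraction(url):
--     return str(sum(url.count(c) for c in "@-.!#'$&,;"))
-- ===== Notes on version B (the rewrite author's own statement) =====
-- stated objective: faster
-- what changed: Replaces the single Python-level pass with an 11-way if/elif chain over hand-kept counters by summing url.count(c) over the ten target characters (C-level scans; the dead percentCount, never incremented, is dropped).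
import Mathlib
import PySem

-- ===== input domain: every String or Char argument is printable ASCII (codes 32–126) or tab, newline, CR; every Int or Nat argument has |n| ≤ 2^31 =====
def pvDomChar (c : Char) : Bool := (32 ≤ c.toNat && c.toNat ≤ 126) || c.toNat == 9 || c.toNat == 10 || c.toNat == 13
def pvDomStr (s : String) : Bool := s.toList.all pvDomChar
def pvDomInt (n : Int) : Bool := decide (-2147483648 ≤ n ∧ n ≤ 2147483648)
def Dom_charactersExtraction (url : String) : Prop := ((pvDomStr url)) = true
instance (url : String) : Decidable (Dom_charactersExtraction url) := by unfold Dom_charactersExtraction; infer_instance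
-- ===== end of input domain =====

-- B sums url.count(c) over the ten target characters instead of A's single pass over
-- an 11-way if/elif chain of hand-kept counters (A's percentCount is dead, always 0).

-- ===== PORT A =====
-- the 11-counter state, in A's declaration order:
-- (arroba, minus, point, admiration, sharp, apostrophe, pesos, percent, ampersand, comma, pointcomma)
def pvStateA := Int × Int × Int × Int × Int × Int × Int × Int × Int × Int × Int

def pvStepA (s : pvStateA) (character : Char) : pvStateA :=
  match s with
  | (ar, mi, po, ad, sh, ap, pe, pc, am, co, se) =>
    if character = '@' then (ar + 1, mi, po, ad, sh, ap, pe, pc, am, co, se)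
    else if character = '-' then (ar, mi + 1, po, ad, sh, ap, pe, pc, am, co, se)
    else if character = '.' then (ar, mi, po + 1, ad, sh, ap, pe, pc, am, co, se)
    else if character = '!' then (ar, mi, po, ad + 1, sh, ap, pe, pc, am, co, se)
    else if character = '#' then (ar, mi, po, ad, sh + 1, ap, pe, pc, am, co, se)
    else if character = '\'' then (ar, mi, po, ad, sh, ap + 1, pe, pc, am, co, se)
    else if character = '$' then (ar, mi, po, ad, sh, ap, pe + 1, pc, am, co, se)
    else if character = '&' then (ar, mi, po, ad, sh, ap, pe, pc, am + 1, co, se)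
    else if character = ',' then (ar, mi, po, ad, sh, ap, pe, pc, am, co + 1, se)
    else if character = ';' then (ar, mi, po, ad, sh, ap, pe, pc, am, co, se + 1)
    else (ar, mi, po, ad, sh, ap, pe, pc, am, co, se)

def charactersExtraction (url : String) : String :=
  match url.toList.foldl pvStepA ((0, 0, 0, 0, 0, 0, 0, 0, 0, 0, 0) : pvStateA) with
  | (ar, mi, po, ad, sh, ap, pe, pc, am, co, se) =>
    PySem.Int.toStr (ar + mi + po + ad + sh + ap + pe + pc + am + co + se)

-- ===== PORT B =====
def charactersExtraction_alt (url : String) : String :=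
  PySem.Int.toStr
    (((("@-.!#'$&,;" : String).toList).map
      (fun c => (PySem.Str.count url (String.ofList [c]) : Int))).sum)

-- ===== PRECONDITION & SPEC =====
def Spec_charactersExtraction (url : String) (out : String) : Prop := out = charactersExtraction_alt url
instance (url : String) (out : String) : Decidable (Spec_charactersExtraction url out) := by unfold Spec_charactersExtraction; infer_instance

-- ===== CLAIM (what is proved, stated in full; the proofs are below) =====
def Claim_equal_charactersExtraction : Prop := ∀ (url : String), Dom_charactersExtraction url → Spec_charactersExtraction url (charactersExtraction url)

-- ===== LEMMAS AND PROOFS =====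

-- Chars.count with a singleton needle is plain list count
theorem count_go_singleton (c : Char) (fuel : Nat) :
    ∀ (l : List Char) (acc : Nat), l.length ≤ fuel →
      PySem.Chars.count.go [c] fuel l acc = acc + l.count c := by
  induction fuel with
  | zero =>
    intro l acc h
    have : l = [] := List.eq_nil_of_length_eq_zero (Nat.le_zero.mp h)
    subst this; simp [PySem.Chars.count.go]
  | succ n ih =>
    intro l acc h
    cases l with
    | nil => simp [PySem.Chars.count.go]
    | cons x t =>
      simp only [PySem.Chars.count.go]
      have ht : t.length ≤ n := by simpa using h
      by_cases hx : x = c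
      · subst hx
        rw [if_pos (by simp [List.isPrefixOf])]
        simp only [List.length_cons, List.length_nil, List.drop_succ_cons, List.drop_zero]
        rw [ih t (acc + 1) ht]
        simp [List.count_cons]
        omega
      · rw [if_neg (by simp [List.isPrefixOf]; exact fun hh => hx hh.symm)]
        rw [ih t acc ht]
        simp [List.count_cons, hx]

theorem charsCount_singleton (l : List Char) (c : Char) :
    PySem.Chars.count l [c] = l.count c := by
  unfold PySem.Chars.count
  simp only [List.isEmpty_cons, if_false, Bool.false_eq_true]
  simpa using count_go_singleton c l.length l 0 (le_refl _)

-- the ten special characters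
def pvSpecials : List Char := ("@-.!#'$&,;" : String).toList

def pvSumA (s : pvStateA) : Int :=
  match s with
  | (ar, mi, po, ad, sh, ap, pe, pc, am, co, se) =>
    ar + mi + po + ad + sh + ap + pe + pc + am + co + se

theorem pvSumA_step (s : pvStateA) (x : Char) :
    pvSumA (pvStepA s x) = pvSumA s + (if x ∈ pvSpecials then 1 else 0) := by
  obtain ⟨ar, mi, po, ad, sh, ap, pe, pc, am, co, se⟩ := s
  by_cases h1 : x = '@'; · subst h1; simp [pvStepA, pvSumA, pvSpecials]; ring
  by_cases h2 : x = '-'; · subst h2; simp [pvStepA, pvSumA, pvSpecials]; ring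
  by_cases h3 : x = '.'; · subst h3; simp [pvStepA, pvSumA, pvSpecials]; ring
  by_cases h4 : x = '!'; · subst h4; simp [pvStepA, pvSumA, pvSpecials]; ring
  by_cases h5 : x = '#'; · subst h5; simp [pvStepA, pvSumA, pvSpecials]; ring
  by_cases h6 : x = '\''; · subst h6; simp [pvStepA, pvSumA, pvSpecials]; ring
  by_cases h7 : x = '$'; · subst h7; simp [pvStepA, pvSumA, pvSpecials]; ring
  by_cases h8 : x = '&'; · subst h8; simp [pvStepA, pvSumA, pvSpecials]; ring
  by_cases h9 : x = ','; · subst h9; simp [pvStepA, pvSumA, pvSpecials]; ring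
  by_cases h10 : x = ';'; · subst h10; simp [pvStepA, pvSumA, pvSpecials]; ring
  have hmem : x ∉ pvSpecials := by
    simp [pvSpecials]
    exact ⟨h1, h2, h3, h4, h5, h6, h7, h8, h9, h10⟩
  simp [pvStepA, pvSumA, h1, h2, h3, h4, h5, h6, h7, h8, h9, h10, hmem]

theorem pvSumA_foldl (l : List Char) :
    ∀ s : pvStateA, pvSumA (l.foldl pvStepA s) = pvSumA s + (l.countP (· ∈ pvSpecials) : Int) := by
  induction l with
  | nil => intro s; simp
  | cons x t ih =>
    intro s
    simp only [List.foldl_cons, List.countP_cons, ih, pvSumA_step]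
    by_cases h : x ∈ pvSpecials <;> simp [h] <;> ring

theorem countP_specials (l : List Char) :
    (l.countP (· ∈ pvSpecials) : Int) =
      (pvSpecials.map (fun c => (l.count c : Int))).sum := by
  induction l with
  | nil => simp
  | cons x t ih =>
    simp only [List.countP_cons, List.count_cons]
    by_cases h1 : x = '@'; · subst h1; simp [pvSpecials] at ih ⊢; omega
    by_cases h2 : x = '-'; · subst h2; simp [pvSpecials] at ih ⊢; omega
    by_cases h3 : x = '.'; · subst h3; simp [pvSpecials] at ih ⊢; omega
    by_cases h4 : x = '!'; · subst h4; simp [pvSpecials] at ih ⊢; omega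
    by_cases h5 : x = '#'; · subst h5; simp [pvSpecials] at ih ⊢; omega
    by_cases h6 : x = '\''; · subst h6; simp [pvSpecials] at ih ⊢; omega
    by_cases h7 : x = '$'; · subst h7; simp [pvSpecials] at ih ⊢; omega
    by_cases h8 : x = '&'; · subst h8; simp [pvSpecials] at ih ⊢; omega
    by_cases h9 : x = ','; · subst h9; simp [pvSpecials] at ih ⊢; omega
    by_cases h10 : x = ';'; · subst h10; simp [pvSpecials] at ih ⊢; omega
    have hmem : x ∉ pvSpecials := by
      simp [pvSpecials]
      exact ⟨h1, h2, h3, h4, h5, h6, h7, h8, h9, h10⟩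
    simp [pvSpecials, h1, h2, h3, h4, h5, h6, h7, h8, h9, h10] at ih ⊢
    omega

-- ===== VERDICT (by name: the statement is the Claim_ definition above) =====
theorem charactersExtraction_spec : Claim_equal_charactersExtraction := by
  intro url _
  unfold Spec_charactersExtraction charactersExtraction charactersExtraction_alt
  have key : ∀ X : pvStateA,
      (match X with
        | (ar, mi, po, ad, sh, ap, pe, pc, am, co, se) =>
          PySem.Int.toStr (ar + mi + po + ad + sh + ap + pe + pc + am + co + se))
        = PySem.Int.toStr (pvSumA X) := by
    intro X
    obtain ⟨ar, mi, po, ad, sh, ap, pe, pc, am, co, se⟩ := X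
    rfl
  rw [key, pvSumA_foldl, countP_specials]
  simp [pvSumA, PySem.Str.count_eq, charsCount_singleton, pvSpecials]
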